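-- pv_equiv track=rewrite | github.com/apadrta/AoC | advent_of_code_2019/day04/solution_part2.py | checkdoublestr
-- ===== SOURCE A (Python) =====
-- def checkdoublestr(istr):
-- 	"""
-- 	check elf single double :)
-- 	"""
-- 	last = istr[0]
-- 	lastlen = 1
-- 	for c in istr[1:]:
-- 		if c == last:
-- 			lastlen +=1
-- 		else:
-- 			if lastlen == 2:
-- 				return True
-- 			else:
-- 				lastlen = 1
-- 		last = c
--
-- 	if lastlen == 2:
-- 		return True
--
-- 	return False
-- ===== SOURCE B (Python) =====
-- def checkdoublestr(istr):
--     # two-pointer run scan: compute each run's length, then test for a run of exactly 2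
--     n = len(istr)
--     i = 0
--     while i < n:
--         j = i
--         while j < n and istr[j] == istr[i]:
--             j += 1
--         if j - i == 2:
--             return True
--         i = j
--     return False
-- ===== Notes on version B (the rewrite author's own statement) =====
-- stated objective: simpler
-- what changed: Replaced the last/lastlen state machine with trailing end-of-loop check by a two-pointer scan that measures each run directly and tests its length for 2.
import Mathlib
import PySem

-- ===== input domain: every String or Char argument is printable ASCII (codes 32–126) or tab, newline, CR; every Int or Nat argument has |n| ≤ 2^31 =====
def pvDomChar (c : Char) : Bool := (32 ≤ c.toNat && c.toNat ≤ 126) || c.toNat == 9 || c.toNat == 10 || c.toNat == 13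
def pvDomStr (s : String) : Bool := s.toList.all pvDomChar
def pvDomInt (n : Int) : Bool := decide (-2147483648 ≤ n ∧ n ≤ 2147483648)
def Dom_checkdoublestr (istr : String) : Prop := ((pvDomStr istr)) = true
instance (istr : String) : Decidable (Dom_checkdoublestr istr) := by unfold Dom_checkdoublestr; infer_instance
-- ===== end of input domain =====

-- B replaces A's last/lastlen state machine (with its trailing end-of-loop check) by a
-- two-pointer run scan that measures each run and tests its length for exactly 2 (objective: simpler).


-- ===== PORT A =====
-- A's loop: state (last, lastlen), early return when a non-matching char closes a run of length 2,
-- plus the trailing `if lastlen == 2` after the loop.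
def checkdoublestrLoop (last : Char) (lastlen : Nat) : List Char → Bool
  | [] => lastlen == 2
  | c :: cs =>
    if c == last then checkdoublestrLoop c (lastlen + 1) cs
    else if lastlen == 2 then true
    else checkdoublestrLoop c 1 cs

def checkdoublestr (istr : String) : Bool :=
  match istr.toList with
  | [] => false    -- unreachable under Pre_: Python A raises IndexError at `istr[0]` here
  | c :: cs => checkdoublestrLoop c 1 cs

-- ===== PORT B =====
-- length of the leading run of chars equal to c (the inner `while istr[j] == istr[i]` pointer advance)
def runLen (c : Char) : List Char → Nat
  | [] => 0
  | d :: ds => if d == c then 1 + runLen c ds else 0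

-- the outer two-pointer loop: list of run lengths
def runs : List Char → List Nat
  | [] => []
  | c :: cs => (1 + runLen c cs) :: runs (cs.drop (runLen c cs))
termination_by l => l.length
decreasing_by
  simp only [List.length_cons]
  exact Nat.lt_succ_of_le (by simp)

def checkdoublestr_alt (istr : String) : Bool :=
  (runs istr.toList).any (fun r => r == 2)

-- ===== PRECONDITION & SPEC =====
-- Pre_ excludes only the empty string, on which Python A raises IndexError (istr[0]).
def Pre_checkdoublestr (istr : String) : Prop := istr ≠ ""
instance (istr : String) : Decidable (Pre_checkdoublestr istr) := by unfold Pre_checkdoublestr; infer_instance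
def pvWitness_checkdoublestr : String := "1223"

def Spec_checkdoublestr (istr : String) (out : Bool) : Prop := out = checkdoublestr_alt istr
instance (istr : String) (out : Bool) : Decidable (Spec_checkdoublestr istr out) := by unfold Spec_checkdoublestr; infer_instance

-- ===== CLAIM =====
def Claim_equal_checkdoublestr : Prop := ∀ (istr : String), Dom_checkdoublestr istr → Pre_checkdoublestr istr → Spec_checkdoublestr istr (checkdoublestr istr)

-- ===== LEMMAS AND PROOFS =====
theorem runLen_congr_of_beq {c d : Char} (h : (d == c) = true) (cs : List Char) :
    runLen d cs = runLen c cs := by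
  cases beq_iff_eq.mp h; rfl

theorem loop_eq_runs (cs : List Char) : ∀ (last : Char) (n : Nat),
    checkdoublestrLoop last n cs =
      (((n + runLen last cs) == 2) || (runs (cs.drop (runLen last cs))).any (fun r => r == 2)) := by
  induction cs with
  | nil => intro last n; simp [checkdoublestrLoop, runLen, runs]
  | cons d ds ih =>
    intro last n
    by_cases h : (d == last) = true
    · simp only [checkdoublestrLoop, runLen, h, if_pos]
      rw [ih d (n + 1), runLen_congr_of_beq h ds, Nat.add_comm 1 (runLen last ds),
        List.drop_succ_cons]
      congr 2
      omega
    · have hr : runLen last (d :: ds) = 0 := by simp [runLen, h]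
      rw [checkdoublestrLoop, if_neg h, hr, Nat.add_zero, List.drop_zero, runs, List.any_cons,
        ih d 1]
      cases n == 2 <;> simp


theorem checkdoublestr_spec : Claim_equal_checkdoublestr := by
  intro istr _ hpre
  unfold Spec_checkdoublestr checkdoublestr checkdoublestr_alt
  cases hl : istr.toList with
  | nil =>
    exact absurd (by simp_all) hpre
  | cons c cs =>
    show checkdoublestrLoop c 1 cs = _
    rw [loop_eq_runs cs c 1]
    conv_rhs => rw [runs]
    simp [List.any_cons]

-- ===== VERDICT =====
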